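-- pv_equiv track=rewrite | github.com/carolinux/advent_of_code | 2023/day13a.py | find_refl
-- ===== SOURCE A (Python) =====
-- def find_refl(mat):
--     mr = 0
--     rows = len(mat)
--     for i in range(rows - 1):
--         if mat[i] == mat[i + 1]:
--             valid = True
--             for j in range(1, rows):
--                 if i - j < 0 or i + j + 1 >= rows:
--                     break
--                 if mat[i - j] != mat[i + j + 1]:
--                     valid = False
--             if valid:
--                 mr = max(mr, i + 1)
--     return mr
-- ===== SOURCE B (Python) =====
-- def find_refl(mat):
--     n = len(mat)
--     for i in range(n - 2, -1, -1):
--         k = min(i + 1, n - i - 1)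
--         if mat[i + 1 - k:i + 1] == mat[i + 1:i + 1 + k][::-1]:
--             return i + 1
--     return 0
-- ===== Notes on version B (the rewrite author's own statement) =====
-- stated objective: alternative
-- what changed: Instead of testing every adjacent equal pair with an inner validity loop (which never breaks on a mismatch) and taking a running max, B scans candidate centers from the bottom up and returns at the first index whose reversed prefix slice equals the suffix slice.
import Mathlib
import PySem

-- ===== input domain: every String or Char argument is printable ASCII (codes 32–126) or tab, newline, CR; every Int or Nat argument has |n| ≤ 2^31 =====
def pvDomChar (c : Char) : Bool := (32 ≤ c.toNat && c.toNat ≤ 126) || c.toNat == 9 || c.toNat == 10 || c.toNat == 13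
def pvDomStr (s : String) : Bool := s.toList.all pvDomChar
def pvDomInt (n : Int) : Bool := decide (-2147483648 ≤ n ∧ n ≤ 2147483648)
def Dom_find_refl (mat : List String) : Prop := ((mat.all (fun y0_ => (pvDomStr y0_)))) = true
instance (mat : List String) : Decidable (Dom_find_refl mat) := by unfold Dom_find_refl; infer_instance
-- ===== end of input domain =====

-- B replaces A's forward sweep with an inner validity loop and a max accumulator by a
-- bottom-up scan returning at the first center whose reversed prefix slice equals the
-- suffix slice (objective: alternative decomposition, same worst-case cost).

-- ===== PORT A =====
-- inner 'for j in range(1, rows)' loop with its break and sticky 'valid' flag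
def pvInnerA (mat : List String) (rows i : Int) (valid : Bool) : List Int → Bool
  | [] => valid
  | j :: js =>
    if i - j < 0 ∨ i + j + 1 ≥ rows then valid
    else pvInnerA mat rows i
      (if PySem.List.pyGet? mat (i - j) ≠ PySem.List.pyGet? mat (i + j + 1) then false else valid) js

def find_refl (mat : List String) : Int :=
  let rows : Int := mat.length
  (PySem.List.pyRange 0 (rows - 1) 1).foldl
    (fun mr i =>
      if PySem.List.pyGet? mat i = PySem.List.pyGet? mat (i + 1) then
        (if pvInnerA mat rows i true (PySem.List.pyRange 1 rows 1) then max mr (i + 1) else mr)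
      else mr) 0

-- ===== PORT B =====
def pvLoopB (mat : List String) (n : Int) : List Int → Int
  | [] => 0
  | i :: is =>
    if PySem.List.slice mat (some (i + 1 - min (i + 1) (n - i - 1))) (some (i + 1)) =
       (PySem.List.slice mat (some (i + 1)) (some (i + 1 + min (i + 1) (n - i - 1)))).reverse
    then i + 1 else pvLoopB mat n is

def find_refl_alt (mat : List String) : Int :=
  let n : Int := mat.length
  pvLoopB mat n (PySem.List.pyRange (n - 2) (-1) (-1))

-- ===== PRECONDITION & SPEC =====
def Spec_find_refl (mat : List String) (out : Int) : Prop := out = find_refl_alt mat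
instance (mat : List String) (out : Int) : Decidable (Spec_find_refl mat out) := by unfold Spec_find_refl; infer_instance

-- ===== CLAIM (what is proved, stated in full; the proofs are below) =====
def Claim_equal_find_refl : Prop := ∀ (mat : List String), Dom_find_refl mat → Spec_find_refl mat (find_refl mat)

-- ===== LEMMAS AND PROOFS =====

-- Bool test "mat[i-j] == mat[i+j+1]"
def pvEq (mat : List String) (i j : Int) : Bool :=
  decide (PySem.List.pyGet? mat (i - j) = PySem.List.pyGet? mat (i + j + 1))

-- the slice test of B at center i
def pvTestB (mat : List String) (n i : Int) : Bool :=
  decide (PySem.List.slice mat (some (i + 1 - min (i + 1) (n - i - 1))) (some (i + 1)) =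
    (PySem.List.slice mat (some (i + 1)) (some (i + 1 + min (i + 1) (n - i - 1)))).reverse)

theorem innerA_char (mat : List String) (n i : Int) :
    ∀ (l : List Int) (valid : Bool),
      pvInnerA mat n i valid l =
        (valid && ((l.takeWhile (fun j => decide (0 ≤ i - j ∧ i + j + 1 < n))).all (pvEq mat i))) := by
  intro l
  induction l with
  | nil => intro valid; simp [pvInnerA]
  | cons j js ih =>
    intro valid
    by_cases h : i - j < 0 ∨ i + j + 1 ≥ n
    · have hp : (decide (0 ≤ i - j ∧ i + j + 1 < n)) = false := by
        simp only [decide_eq_false_iff_not]; omega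
      rw [pvInnerA, if_pos h, List.takeWhile_cons, hp]
      simp
    · have hp : (decide (0 ≤ i - j ∧ i + j + 1 < n)) = true := by
        simp only [decide_eq_true_eq]; omega
      rw [pvInnerA, if_neg h, List.takeWhile_cons, hp, ih]
      by_cases heq : PySem.List.pyGet? mat (i - j) = PySem.List.pyGet? mat (i + j + 1)
      · cases valid <;> simp [pvEq, heq]
      · cases valid <;> simp [pvEq, heq]

theorem takeWhile_pyRange (i n : Int) :
    ∀ (m : Nat) (a b : Int), b - a ≤ (m : Int) →
      ((PySem.List.pyRange a b 1).takeWhile (fun j => decide (0 ≤ i - j ∧ i + j + 1 < n))) =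
        PySem.List.pyRange a (min b (min (i + 1) (n - i - 1))) 1 := by
  intro m
  induction m with
  | zero =>
    intro a b hab0
    rw [PySem.List.pyRange_one_eq_nil (by omega), PySem.List.pyRange_one_eq_nil (by omega)]
    simp
  | succ m ih =>
    intro a b hb
    by_cases hab : b ≤ a
    · rw [PySem.List.pyRange_one_eq_nil hab, PySem.List.pyRange_one_eq_nil (by omega)]
      simp
    · rw [PySem.List.pyRange_one_cons (by omega), List.takeWhile_cons]
      by_cases hp : 0 ≤ i - a ∧ i + a + 1 < n
      · have h2 : a < min b (min (i + 1) (n - i - 1)) := by omega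
        rw [decide_eq_true hp]
        simp only [if_true]
        rw [ih (a + 1) b (by omega), PySem.List.pyRange_one_cons h2]
      · have h2 : min b (min (i + 1) (n - i - 1)) ≤ a := by omega
        rw [decide_eq_false hp]
        simp only [Bool.false_eq_true, if_false]
        rw [PySem.List.pyRange_one_eq_nil h2]

-- A's combined condition at i equals "all j < K" with K = min (i+1) (n-i-1)
theorem condA_char (mat : List String) (i : Int) (h0 : 0 ≤ i) (h1 : i < (mat.length : Int) - 1) :
    ((decide (PySem.List.pyGet? mat i = PySem.List.pyGet? mat (i + 1))) &&
      pvInnerA mat (mat.length : Int) i true (PySem.List.pyRange 1 (mat.length : Int) 1)) =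
    (PySem.List.pyRange 0 (min (i + 1) ((mat.length : Int) - i - 1)) 1).all (pvEq mat i) := by
  have hn : (0 : Int) ≤ (mat.length : Int) := by positivity
  rw [innerA_char, takeWhile_pyRange i (mat.length : Int) mat.length 1 (mat.length : Int) (by omega)]
  have hmin : min (mat.length : Int) (min (i + 1) ((mat.length : Int) - i - 1))
      = min (i + 1) ((mat.length : Int) - i - 1) := by omega
  rw [hmin, PySem.List.pyRange_one_cons (a := 0) (by omega), List.all_cons]
  have h0 : pvEq mat i 0 = decide (PySem.List.pyGet? mat i = PySem.List.pyGet? mat (i + 1)) := by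
    simp [pvEq]
  rw [h0]
  rw [show (0 : Int) + 1 = 1 by norm_num]
  cases decide (PySem.List.pyGet? mat i = PySem.List.pyGet? mat (i + 1)) <;> simp

theorem take_drop_reverse_iff {α : Type} [DecidableEq α] (l : List α) (a b kk : Nat)
    (ha : a + kk ≤ l.length) (hb : b + kk ≤ l.length) :
    ((l.drop a).take kk = ((l.drop b).take kk).reverse) ↔
      ∀ t (_ : t < kk), l[a + t]'(by omega) = l[b + (kk - 1 - t)]'(by omega) := by
  have h1 : ((l.drop a).take kk).length = kk := by simp; omega
  have h2 : ((l.drop b).take kk).length = kk := by simp; omega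
  constructor
  · intro h t ht
    have ht1 : t < ((l.drop a).take kk).length := by omega
    have hg := List.getElem_of_eq h ht1
    rw [List.getElem_reverse] at hg
    simp only [List.getElem_take, List.getElem_drop, h2] at hg
    exact hg
  · intro h
    apply List.ext_getElem (by rw [h1, List.length_reverse, h2])
    intro t ht1 ht2
    rw [List.getElem_reverse]
    simp only [List.getElem_take, List.getElem_drop, h2]
    exact h t (by omega)

theorem condB_char (mat : List String) (i : Int) (h0 : 0 ≤ i) (h1 : i < (mat.length : Int) - 1) :
    pvTestB mat (mat.length : Int) i =
      (PySem.List.pyRange 0 (min (i + 1) ((mat.length : Int) - i - 1)) 1).all (pvEq mat i) := by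
  set n : Int := (mat.length : Int) with hn
  set K : Int := min (i + 1) (n - i - 1) with hK
  have hK1 : 1 ≤ K := by omega
  have hK2 : K ≤ i + 1 := by omega
  have hK3 : i + 1 + K ≤ n := by omega
  have ha : (i + 1 - K).toNat + K.toNat ≤ mat.length := by omega
  have hb : (i + 1).toNat + K.toNat ≤ mat.length := by omega
  have hiff : ((mat.drop (i + 1 - K).toNat).take K.toNat =
        ((mat.drop (i + 1).toNat).take K.toNat).reverse) ↔
      ∀ j ∈ PySem.List.pyRange 0 K 1, pvEq mat i j = true := by
    rw [take_drop_reverse_iff mat _ _ _ ha hb]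
    constructor
    · intro h j hj
      rw [PySem.List.mem_pyRange_one] at hj
      have ht : K.toNat - 1 - j.toNat < K.toNat := by omega
      have hg := h (K.toNat - 1 - j.toNat) ht
      simp only [show (i + 1 - K).toNat + (K.toNat - 1 - j.toNat) = (i - j).toNat from by omega,
        show (i + 1).toNat + (K.toNat - 1 - (K.toNat - 1 - j.toNat)) = (i + j + 1).toNat from by omega] at hg
      rw [pvEq, decide_eq_true_eq,
        PySem.List.pyGet?_eq_some_getElem mat (by omega) (by omega),
        PySem.List.pyGet?_eq_some_getElem mat (by omega) (by omega)]
      exact congrArg some hg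
    · intro h t ht
      have hj := h (K - 1 - (t : Int)) (by rw [PySem.List.mem_pyRange_one]; omega)
      rw [pvEq, decide_eq_true_eq,
        PySem.List.pyGet?_eq_some_getElem mat (by omega) (by omega),
        PySem.List.pyGet?_eq_some_getElem mat (by omega) (by omega)] at hj
      have hj' := Option.some.inj hj
      simp only [show (i - (K - 1 - (t : Int))).toNat = (i + 1 - K).toNat + t from by omega,
        show (i + (K - 1 - (t : Int)) + 1).toNat = (i + 1).toNat + (K.toNat - 1 - t) from by omega] at hj'
      exact hj'
  have hsl : pvTestB mat n i =
      decide ((mat.drop (i + 1 - K).toNat).take K.toNat =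
        ((mat.drop (i + 1).toNat).take K.toNat).reverse) := by
    rw [pvTestB, PySem.List.slice_toNat _ (by omega) (by omega),
      PySem.List.slice_toNat _ (by omega) (by omega),
      show (i + 1).toNat - (i + 1 - K).toNat = K.toNat from by omega,
      show (i + 1 + K).toNat - (i + 1).toNat = K.toNat from by omega]
  rw [hsl]
  cases hall : (PySem.List.pyRange 0 K 1).all (pvEq mat i) with
  | true =>
    rw [List.all_eq_true] at hall
    exact decide_eq_true (hiff.mpr hall)
  | false =>
    apply decide_eq_false
    intro hP
    have hcontra := List.all_eq_true.mpr (hiff.mp hP)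
    rw [hall] at hcontra
    exact Bool.false_ne_true hcontra

theorem foldl_le (mat : List String) (n : Int) :
    ∀ (l : List Int) (init c : Int), init ≤ c → (∀ y ∈ l, y + 1 ≤ c) →
      l.foldl (fun mr i => if pvTestB mat n i then max mr (i + 1) else mr) init ≤ c := by
  intro l
  induction l with
  | nil => intro init c h _; simpa using h
  | cons y ys ih =>
    intro init c h hall
    rw [List.foldl_cons]
    apply ih
    · by_cases ht : pvTestB mat n y
      · rw [if_pos ht]
        have := hall y (by simp)
        omega
      · rw [if_neg ht]; exact h
    · intro z hz; exact hall z (by simp [hz])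

theorem loopB_foldl (mat : List String) (n : Int) :
    ∀ (l : List Int), l.Pairwise (· < ·) → (∀ x ∈ l, 0 ≤ x) →
      pvLoopB mat n l.reverse =
        l.foldl (fun mr i => if pvTestB mat n i then max mr (i + 1) else mr) 0 := by
  intro l
  induction l using List.reverseRecOn with
  | nil => intro _ _; simp [pvLoopB]
  | append_singleton ys x ih =>
    intro hpw hnn
    have hparts := List.pairwise_append.mp hpw
    have hlt : ∀ y ∈ ys, y < x := fun y hy => hparts.2.2 y hy x (by simp)
    rw [List.reverse_append, List.reverse_singleton, List.singleton_append, List.foldl_append,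
      List.foldl_cons, List.foldl_nil, pvLoopB]
    by_cases hx : PySem.List.slice mat (some (x + 1 - min (x + 1) (n - x - 1))) (some (x + 1)) =
        (PySem.List.slice mat (some (x + 1)) (some (x + 1 + min (x + 1) (n - x - 1)))).reverse
    · rw [if_pos hx, if_pos (by rw [pvTestB]; exact decide_eq_true hx)]
      have hle : ys.foldl (fun mr i => if pvTestB mat n i then max mr (i + 1) else mr) 0 ≤ x + 1 := by
        apply foldl_le
        · have := hnn x (by simp); omega
        · intro y hy; have := hlt y hy; omega
      omega
    · rw [if_neg hx, if_neg (by rw [pvTestB]; simp [hx]),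
        ih hparts.1 (fun y hy => hnn y (by simp [hy]))]

-- ===== VERDICT (by name: the statement is the Claim_ definition above) =====
theorem find_refl_spec : Claim_equal_find_refl := by
  intro mat _
  show find_refl mat = find_refl_alt mat
  have hrev : PySem.List.pyRange ((mat.length : Int) - 2) (-1) (-1) =
      (PySem.List.pyRange 0 ((mat.length : Int) - 1) 1).reverse := by
    rw [PySem.List.pyRange_neg_one_eq_reverse]
    rw [show (mat.length : Int) - 2 + 1 = (mat.length : Int) - 1 from by ring,
      show (-1 : Int) + 1 = 0 from by norm_num]
  have hnn : ∀ x ∈ PySem.List.pyRange 0 ((mat.length : Int) - 1) 1, 0 ≤ x := by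
    intro x hx
    rw [PySem.List.mem_pyRange_one] at hx
    omega
  show (PySem.List.pyRange 0 ((mat.length : Int) - 1) 1).foldl _ 0 =
      pvLoopB mat (mat.length : Int) (PySem.List.pyRange ((mat.length : Int) - 2) (-1) (-1))
  rw [hrev, loopB_foldl mat (mat.length : Int) _ (PySem.List.pairwise_lt_pyRange_one _ _) hnn]
  apply PySem.List.foldl_congr_mem
  intro acc x hx
  rw [PySem.List.mem_pyRange_one] at hx
  have hc : pvTestB mat (mat.length : Int) x =
      ((decide (PySem.List.pyGet? mat x = PySem.List.pyGet? mat (x + 1))) &&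
        pvInnerA mat (mat.length : Int) x true (PySem.List.pyRange 1 (mat.length : Int) 1)) :=
    (condB_char mat x hx.1 (by omega)).trans (condA_char mat x hx.1 (by omega)).symm
  by_cases h1 : PySem.List.pyGet? mat x = PySem.List.pyGet? mat (x + 1)
  · by_cases h2 : pvInnerA mat (mat.length : Int) x true (PySem.List.pyRange 1 (mat.length : Int) 1)
    · simp [h1, h2, hc]
    · simp [h1, h2, hc]
  · simp [h1, hc]
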